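-- pv_equiv track=rewrite | github.com/oBaldon/spawn-pixelmon | parser/final_tags.py | expand_recursively
-- ===== SOURCE A (Python) =====
-- def expand_recursively(value, mcbiome_data, seen):
--     """Expande recursivamente uma tag do Minecraft"""
--     if value in seen:
--         return []
--
--     if isinstance(value, str) and value.startswith("#") and value in mcbiome_data:
--         seen.add(value)
--         result = []
--         for subvalue in mcbiome_data[value]:
--             result.extend(expand_recursively(subvalue, mcbiome_data, seen))
--         return result
--     else:
--         return [value]
-- ===== SOURCE B (Python) =====
-- def expand_recursively(value, mcbiome_data, seen):
--     """Expande recursivamente uma tag do Minecraft (iterative DFS with an explicit stack)."""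
--     result = []
--     stack = [value]
--     while stack:
--         v = stack.pop()
--         if v in seen:
--             continue
--         if isinstance(v, str) and v.startswith("#") and v in mcbiome_data:
--             seen.add(v)
--             stack.extend(reversed(mcbiome_data[v]))
--         else:
--             result.append(v)
--     return result
-- ===== Notes on version B (the rewrite author's own statement) =====
-- stated objective: alternative
-- what changed: Replaced the recursive expansion (recursion per tag with an inner for-loop extending results) by an iterative pre-order DFS over an explicit stack with a single accumulator list; no recursion remains.
import Mathlib
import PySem

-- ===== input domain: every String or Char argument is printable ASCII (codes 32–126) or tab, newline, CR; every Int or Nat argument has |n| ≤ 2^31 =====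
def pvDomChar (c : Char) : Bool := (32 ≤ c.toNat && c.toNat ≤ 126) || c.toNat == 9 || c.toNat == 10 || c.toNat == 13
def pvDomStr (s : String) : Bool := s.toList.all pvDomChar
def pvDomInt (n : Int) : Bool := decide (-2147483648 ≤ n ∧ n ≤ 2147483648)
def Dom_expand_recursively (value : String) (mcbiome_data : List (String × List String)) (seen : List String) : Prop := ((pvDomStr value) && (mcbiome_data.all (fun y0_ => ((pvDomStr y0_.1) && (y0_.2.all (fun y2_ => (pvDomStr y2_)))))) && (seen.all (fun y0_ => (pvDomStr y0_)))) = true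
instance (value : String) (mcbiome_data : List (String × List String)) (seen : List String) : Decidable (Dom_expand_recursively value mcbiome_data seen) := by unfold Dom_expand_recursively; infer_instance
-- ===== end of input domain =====

-- B replaces A's recursion by an iterative pre-order DFS over an explicit stack (same return value;
-- both Pythons mutate `seen` in place identically; the theorems here are about the return value).

-- ===== PORT A =====
-- Number of dict keys not yet in `seen`: the quantity that strictly shrinks at each tag
-- expansion; used only as a fuel bound (port A) / termination measure (port B).
def erFresh (mcbiome_data : List (String × List String)) (seen : PySem.Set String) : Nat :=
  ((PySem.Dict.ofList mcbiome_data).keys.filter (fun k => !(PySem.Set.contains seen k))).length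

-- cited by the ports' fuel-sufficiency/termination proofs: adding to `seen` an element of K
-- that it lacks strictly shrinks the filtered count
theorem erFilter_add_lt (K : List String) (seen : PySem.Set String)
    (v : String) (hmem : v ∈ K) (hs : PySem.Set.contains seen v = false) :
    (K.filter (fun k => !(PySem.Set.contains (PySem.Set.add seen v) k))).length <
    (K.filter (fun k => !(PySem.Set.contains seen k))).length := by
  have hvnot : v ∉ seen := by simpa using hs
  have hadd : PySem.Set.add seen v = seen ++ [v] := by
    simp [PySem.Set.add, hvnot]
  have hfilter : ∀ k, (!(PySem.Set.contains (PySem.Set.add seen v) k)) =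
      ((!(k == v)) && (!(PySem.Set.contains seen k))) := by
    intro k
    simp [hadd, PySem.Set.contains]
    by_cases h1 : k = v <;> by_cases h2 : k ∈ seen <;> simp_all
  calc ((K.filter (fun k => !(PySem.Set.contains (PySem.Set.add seen v) k))).length)
      = ((K.filter (fun k => !(PySem.Set.contains seen k))).filter (fun k => !(k == v))).length := by
        simp only [List.filter_filter]
        exact congrArg List.length (List.filter_congr (fun k _ => by rw [hfilter k]))
    _ < (K.filter (fun k => !(PySem.Set.contains seen k))).length := by
        apply List.length_filter_lt_length_iff_exists.mpr
        exact ⟨v, List.mem_filter.mpr ⟨hmem, by simp [hvnot]⟩, by simp⟩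

theorem erFresh_add_lt (data : List (String × List String)) (seen : PySem.Set String)
    (v : String) (hv : (PySem.Dict.ofList data).contains v = true)
    (hs : PySem.Set.contains seen v = false) :
    erFresh data (PySem.Set.add seen v) < erFresh data seen :=
  erFilter_add_lt _ seen v ((PySem.Dict.contains_iff_mem_keys _ _).mp hv) hs

-- A is recursive and terminates because `seen` gains a fresh dict key at every tag expansion;
-- the fuel `keys.length + 1` strictly exceeds erFresh, so it never runs out (erSuff below).
mutual
def erExpandF : Nat → String → List (String × List String) → PySem.Set String →
    Option (List String × PySem.Set String)
  | 0, _, _, _ => none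
  | (f+1), v, data, seen =>
      if PySem.Set.contains seen v then some ([], seen)          -- if value in seen: return []
      -- isinstance(value, str) is always true under the type convention
      else if PySem.Str.startswith v "#" && (PySem.Dict.ofList data).contains v then
        -- seen.add(value); result extended by each child's expansion, threading `seen`
        erGoF f ((PySem.Dict.ofList data).getD v []) data (PySem.Set.add seen v)
      else some ([v], seen)                                      -- return [value]
  termination_by f _ _ _ => (f, 0)
  decreasing_by exact Prod.Lex.left _ _ (Nat.lt_succ_self _)

def erGoF : Nat → List String → List (String × List String) → PySem.Set String →
    Option (List String × PySem.Set String)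
  | _, [], _, seen => some ([], seen)
  | f, (c :: cs), data, seen =>
      match erExpandF f c data seen with
      | none => none
      | some (o, s') =>
        match erGoF f cs data s' with
        | none => none
        | some (o2, s'') => some (o ++ o2, s'')
  termination_by f l _ _ => (f, l.length + 1)
  decreasing_by
    · exact Prod.Lex.right _ (by omega)
    · exact Prod.Lex.right _ (by simp)
end

def expand_recursively (value : String) (mcbiome_data : List (String × List String)) (seen : List String) : List String :=
  match erExpandF ((PySem.Dict.ofList mcbiome_data).keys.length + 1) value mcbiome_data seen with
  | some (o, _) => o
  | none => []   -- unreachable: the fuel exceeds erFresh (see erSuff)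

-- ===== PORT B =====
-- iterative DFS: pop the top of the stack; skip if seen, push children of a fresh tag, emit a leaf;
-- children go on top of the stack so they are processed left-to-right (Python pushes them reversed
-- on the end of the list and pops from the end; here the head of the list is the top of the stack).
def erRun : List String → List (String × List String) → PySem.Set String → List String → List String
  | [], _, _, acc => acc
  | (v :: rest), data, seen, acc =>
      if h1 : PySem.Set.contains seen v then erRun rest data seen acc
      else if h2 : PySem.Str.startswith v "#" && (PySem.Dict.ofList data).contains v then
        erRun ((PySem.Dict.ofList data).getD v [] ++ rest) data (PySem.Set.add seen v) acc
      else erRun rest data seen (acc ++ [v])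
termination_by stack data seen _ => (erFresh data seen, stack.length)
decreasing_by
  · exact Prod.Lex.right _ (by simp)
  · exact Prod.Lex.left _ _
      (erFresh_add_lt data seen v (Bool.and_eq_true _ _ ▸ h2).2 (Bool.not_eq_true _ ▸ (by exact h1)))
  · exact Prod.Lex.right _ (by simp)

def expand_recursively_alt (value : String) (mcbiome_data : List (String × List String)) (seen : List String) : List String :=
  erRun [value] mcbiome_data seen []

-- ===== PRECONDITION & SPEC =====
def Spec_expand_recursively (value : String) (mcbiome_data : List (String × List String)) (seen : List String) (out : List String) : Prop := out = expand_recursively_alt value mcbiome_data seen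
instance (value : String) (mcbiome_data : List (String × List String)) (seen : List String) (out : List String) : Decidable (Spec_expand_recursively value mcbiome_data seen out) := by unfold Spec_expand_recursively; infer_instance

-- ===== CLAIM (what is proved, stated in full; the proofs are below) =====
def Claim_equal_expand_recursively : Prop := ∀ (value : String) (mcbiome_data : List (String × List String)) (seen : List String), Dom_expand_recursively value mcbiome_data seen → Spec_expand_recursively value mcbiome_data seen (expand_recursively value mcbiome_data seen)

-- ===== LEMMAS AND PROOFS =====

-- Fuel sufficiency: with fuel > erFresh, both fueled functions return `some`,
-- and the returned `seen` has no more fresh keys than the input one.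
theorem erSuff (f : Nat) :
    (∀ (v : String) (data : List (String × List String)) (seen : PySem.Set String),
      erFresh data seen < f → ∃ o s', erExpandF f v data seen = some (o, s') ∧
        erFresh data s' ≤ erFresh data seen) ∧
    (∀ (vals : List String) (data : List (String × List String)) (seen : PySem.Set String),
      erFresh data seen < f → ∃ o s', erGoF f vals data seen = some (o, s') ∧
        erFresh data s' ≤ erFresh data seen) := by
  induction f with
  | zero => exact ⟨fun _ _ _ h => absurd h (by omega),
      fun vals data seen h => absurd h (by omega)⟩
  | succ g ih =>
    have hP : ∀ (v : String) (data : List (String × List String)) (seen : PySem.Set String),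
        erFresh data seen < g + 1 → ∃ o s', erExpandF (g+1) v data seen = some (o, s') ∧
          erFresh data s' ≤ erFresh data seen := by
      intro v data seen hf
      by_cases h1 : PySem.Set.contains seen v = true
      · exact ⟨[], seen, by rw [erExpandF, if_pos h1], le_refl _⟩
      · by_cases h2 : (PySem.Str.startswith v "#" && (PySem.Dict.ofList data).contains v) = true
        · have hlt : erFresh data (PySem.Set.add seen v) < erFresh data seen :=
            erFresh_add_lt data seen v (Bool.and_eq_true _ _ ▸ h2).2
              (Bool.not_eq_true _ ▸ (by exact h1))
          obtain ⟨o, s', hgo, hle⟩ := ih.2 ((PySem.Dict.ofList data).getD v []) data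
            (PySem.Set.add seen v) (by omega)
          exact ⟨o, s', by rw [erExpandF, if_neg h1, if_pos h2]; exact hgo, by omega⟩
        · exact ⟨[v], seen, by rw [erExpandF, if_neg h1, if_neg h2], le_refl _⟩
    refine ⟨hP, ?_⟩
    intro vals
    induction vals with
    | nil => exact fun data seen h => ⟨[], seen, by rw [erGoF], le_refl _⟩
    | cons c cs ihv =>
      intro data seen hf
      obtain ⟨o1, s1, he, hle1⟩ := hP c data seen hf
      obtain ⟨o2, s2, hg, hle2⟩ := ihv data s1 (by omega)
      exact ⟨o1 ++ o2, s2, by rw [erGoF]; simp [he, hg], by omega⟩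

-- Bridge: A's recursion on a list of pending values equals B's stack machine run on that list.
theorem erBridge (f : Nat) :
    ∀ (vals : List String) (data : List (String × List String)) (seen : PySem.Set String)
      (acc rest : List String) (o : List String) (s' : PySem.Set String),
      erGoF f vals data seen = some (o, s') →
      erRun (vals ++ rest) data seen acc = erRun rest data s' (acc ++ o) := by
  induction f with
  | zero =>
    intro vals data seen acc rest o s' h
    cases vals with
    | nil => rw [erGoF] at h; simp_all
    | cons c cs => rw [erGoF, erExpandF] at h; simp at h
  | succ g ihf =>
    intro vals
    induction vals with
    | nil =>
      intro data seen acc rest o s' h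
      rw [erGoF] at h
      simp at h
      simp [h.1, h.2]
    | cons v vs ihv =>
      intro data seen acc rest o s' h
      rw [erGoF] at h
      cases he : erExpandF (g+1) v data seen with
      | none => rw [he] at h; simp at h
      | some p =>
        obtain ⟨o1, s1⟩ := p
        rw [he] at h
        dsimp only at h
        cases hg : erGoF (g+1) vs data s1 with
        | none => rw [hg] at h; simp at h
        | some q =>
          obtain ⟨o2, s2⟩ := q
          rw [hg] at h
          simp at h
          obtain ⟨ho, hs⟩ := h
          subst ho hs
          rw [erExpandF] at he
          by_cases h1 : PySem.Set.contains seen v = true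
          · rw [if_pos h1] at he
            obtain ⟨h1', h2'⟩ := Prod.mk.injEq _ _ _ _ ▸ Option.some.injEq _ _ ▸ he
            subst h1' h2'
            rw [List.cons_append, erRun, dif_pos h1]
            rw [ihv data seen acc rest o2 s2 hg]
            simp
          · by_cases h2 : (PySem.Str.startswith v "#" && (PySem.Dict.ofList data).contains v) = true
            · rw [if_neg h1, if_pos h2] at he
              rw [List.cons_append, erRun, dif_neg h1, dif_pos h2]
              rw [ihf ((PySem.Dict.ofList data).getD v []) data (PySem.Set.add seen v)
                    acc (vs ++ rest) o1 s1 he]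
              rw [ihv data s1 (acc ++ o1) rest o2 s2 hg]
              simp
            · rw [if_neg h1, if_neg h2] at he
              obtain ⟨h1', h2'⟩ := Prod.mk.injEq _ _ _ _ ▸ Option.some.injEq _ _ ▸ he
              subst h1' h2'
              rw [List.cons_append, erRun, dif_neg h1, dif_neg h2]
              rw [ihv data seen (acc ++ [v]) rest o2 s2 hg]
              simp

-- ===== VERDICT (by name: the statement is the Claim_ definition above) =====
theorem expand_recursively_spec : Claim_equal_expand_recursively := by
  intro value data seen _
  unfold Spec_expand_recursively expand_recursively expand_recursively_alt
  set F := (PySem.Dict.ofList data).keys.length + 1 with hF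
  have hfuel : erFresh data seen < F := by
    have : erFresh data seen ≤ (PySem.Dict.ofList data).keys.length :=
      List.length_filter_le _ _
    omega
  obtain ⟨o, s', he, _⟩ := (erSuff F).1 value data seen hfuel
  have hgo : erGoF F [value] data seen = some (o ++ [], s') := by
    simp [erGoF, he]
  have hb := erBridge F [value] data seen [] [] (o ++ []) s' hgo
  rw [he]
  calc o = [] ++ (o ++ []) := by simp
    _ = erRun [] data s' ([] ++ (o ++ [])) := by rw [erRun]
    _ = erRun ([value] ++ []) data seen [] := hb.symm
    _ = erRun [value] data seen [] := by simp
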